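-- pv_equiv track=rewrite | github.com/sejaldua/advent-of-code-2021 | solution_code/day04.py | check_markers
-- ===== SOURCE A (Python) =====
-- def check_markers(arr):
--     t_arr = [list(i) for i in zip(*arr)]
--     if any(list(map(lambda x: True if sum(x) == len(arr) else False, arr))):
--         return True
--     elif any(list(map(lambda x: True if sum(x) == len(arr) else False, t_arr))):
--         return True
--     else:
--         return False
-- ===== SOURCE B (Python) =====
-- def check_markers(arr):
--     n = len(arr)
--     cols = None
--     for row in arr:
--         if sum(row) == n:
--             return True
--         if cols is None:
--             cols = list(row)
--         else:
--             if len(row) < len(cols):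
--                 cols = cols[:len(row)]
--             for i in range(len(cols)):
--                 cols[i] += row[i]
--     return cols is not None and any(c == n for c in cols)
-- ===== Notes on version B (the rewrite author's own statement) =====
-- stated objective: alternative
-- what changed: Single pass over the rows maintaining running column accumulators (truncated to the shortest row seen) with an early return on a full row, instead of building the transpose with zip(*arr) and doing two separate any/map passes.
import Mathlib
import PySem

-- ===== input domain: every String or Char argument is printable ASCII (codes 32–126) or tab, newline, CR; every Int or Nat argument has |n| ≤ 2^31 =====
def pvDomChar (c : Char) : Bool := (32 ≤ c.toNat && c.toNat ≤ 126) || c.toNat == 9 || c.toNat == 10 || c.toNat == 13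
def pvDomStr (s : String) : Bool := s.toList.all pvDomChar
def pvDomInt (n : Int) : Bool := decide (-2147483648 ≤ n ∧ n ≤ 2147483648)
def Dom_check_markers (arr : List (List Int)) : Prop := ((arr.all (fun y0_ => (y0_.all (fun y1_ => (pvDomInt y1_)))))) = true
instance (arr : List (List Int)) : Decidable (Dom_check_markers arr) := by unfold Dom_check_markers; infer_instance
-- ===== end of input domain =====

-- B replaces A's zip(*arr) transpose and two any/map passes by one pass with running
-- column accumulators and an early return (objective: alternative decomposition).


-- ===== PORT A =====
-- zip(*arr): transpose truncated to the shortest row (exact port of Python's zip)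
def pyZipStar : List (List Int) → List (List Int)
  | [] => []
  | [r] => r.map (fun x => [x])
  | r :: rs => List.zipWith (fun x col => x :: col) r (pyZipStar rs)

def check_markers (arr : List (List Int)) : Bool :=
  let t_arr := pyZipStar arr
  if (arr.map (fun x => if x.sum == (arr.length : Int) then true else false)).any id then
    true
  else if (t_arr.map (fun x => if x.sum == (arr.length : Int) then true else false)).any id then
    true
  else
    false

-- ===== PORT B =====
-- the for-loop of Source B with its early return; the inner 'for i in range(len(cols))'
-- (cols[i] += row[i], with len cols ≤ len row after the truncation) is List.zipWith (·+·)
def altGo (n : Int) : List (List Int) → Option (List Int) → Bool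
  | [], cols =>
      match cols with
      | none => false
      | some cs => cs.any (fun c => c == n)
  | r :: rs, cols =>
      if r.sum == n then true
      else
        match cols with
        | none => altGo n rs (some r)
        | some cs =>
            let cs' := if r.length < cs.length then cs.take r.length else cs
            altGo n rs (some (List.zipWith (· + ·) cs' r))

def check_markers_alt (arr : List (List Int)) : Bool :=
  altGo (arr.length : Int) arr none

-- ===== PRECONDITION & SPEC =====
def Spec_check_markers (arr : List (List Int)) (out : Bool) : Prop := out = check_markers_alt arr
instance (arr : List (List Int)) (out : Bool) : Decidable (Spec_check_markers arr out) := by unfold Spec_check_markers; infer_instance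

-- ===== CLAIM (what is proved, stated in full; the proofs are below) =====
def Claim_equal_check_markers : Prop := ∀ (arr : List (List Int)), Dom_check_markers arr → Spec_check_markers arr (check_markers arr)

-- ===== LEMMAS AND PROOFS =====

theorem zipWith_take_left (cs r : List Int) :
    List.zipWith (· + ·) (cs.take r.length) r = List.zipWith (· + ·) cs r := by
  induction cs generalizing r with
  | nil => simp
  | cons c ct ih =>
    cases r with
    | nil => simp
    | cons x xs => simp [ih]

theorem zipWith_add_take {cs r : List Int} :
    List.zipWith (· + ·) (if r.length < cs.length then cs.take r.length else cs) r
      = List.zipWith (· + ·) cs r := by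
  split
  · exact zipWith_take_left cs r
  · rfl

theorem pyZipStar_cons_cons (r r2 : List Int) (rs : List (List Int)) :
    pyZipStar (r :: r2 :: rs) = List.zipWith (fun x col => x :: col) r (pyZipStar (r2 :: rs)) := rfl

theorem map_sum_zipStar {a : List Int} {cols : List (List Int)} :
    (List.zipWith (fun x col => x :: col) a cols).map List.sum
      = List.zipWith (· + ·) a (cols.map List.sum) := by
  induction a generalizing cols with
  | nil => simp
  | cons x xs ih =>
    cases cols with
    | nil => simp
    | cons c cst => simp [ih]

theorem zipWith_add_assoc (a b c : List Int) :
    List.zipWith (· + ·) (List.zipWith (· + ·) a b) c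
      = List.zipWith (· + ·) a (List.zipWith (· + ·) b c) := by
  induction a generalizing b c with
  | nil => simp
  | cons x xs ih =>
    cases b with
    | nil => simp
    | cons y ys =>
      cases c with
      | nil => simp
      | cons z zs => simp [ih, Int.add_assoc]

theorem foldl_zipWith_step (ws : List (List Int)) (u v : List Int) :
    ws.foldl (fun cs row => List.zipWith (· + ·) cs row) (List.zipWith (· + ·) u v)
      = List.zipWith (· + ·) u (ws.foldl (fun cs row => List.zipWith (· + ·) cs row) v) := by
  induction ws generalizing u v with
  | nil => rfl
  | cons w ws ih => simp only [List.foldl_cons, zipWith_add_assoc, ih]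

theorem foldl_zipWith_add (rs : List (List Int)) (r : List Int) :
    rs.foldl (fun cs row => List.zipWith (· + ·) cs row) r
      = (pyZipStar (r :: rs)).map List.sum := by
  induction rs generalizing r with
  | nil => simp [pyZipStar, List.map_map, Function.comp_def]
  | cons r2 rs' ih =>
    show rs'.foldl _ (List.zipWith (· + ·) r r2) = _
    rw [foldl_zipWith_step, ih r2, pyZipStar_cons_cons, map_sum_zipStar]

theorem altGo_some (n : Int) (rs : List (List Int)) (cs : List Int) :
    altGo n rs (some cs)
      = (rs.any (fun r => r.sum == n)
          || (rs.foldl (fun cs row => List.zipWith (· + ·) cs row) cs).any (fun c => c == n)) := by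
  induction rs generalizing cs with
  | nil => simp [altGo]
  | cons r rs' ih =>
    by_cases h : r.sum = n
    · simp [altGo, h]
    · have hb : (r.sum == n) = false := by simp [h]
      simp only [altGo, hb, Bool.false_eq_true, if_false, List.any_cons, List.foldl_cons,
        zipWith_add_take, ih, Bool.false_or]

theorem if_bool_id (b : Bool) : (if b then true else false) = b := by cases b <;> rfl

theorem check_markers_rows_cols (arr : List (List Int)) :
    check_markers arr
      = (arr.any (fun x => x.sum == (arr.length : Int))
          || (pyZipStar arr).any (fun x => x.sum == (arr.length : Int))) := by
  simp only [check_markers, List.any_map, Function.comp_def, if_bool_id, id_eq]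
  by_cases h1 : (arr.any fun x => x.sum == (arr.length : Int)) = true
  · rw [h1]
    simp only [if_true, Bool.true_or]
  · rw [Bool.not_eq_true] at h1
    rw [h1]
    simp only [Bool.false_eq_true, if_false, Bool.false_or]

theorem check_markers_eq (arr : List (List Int)) :
    check_markers arr = check_markers_alt arr := by
  cases arr with
  | nil => rfl
  | cons r rs =>
    rw [check_markers_rows_cols]
    show _ = altGo _ (r :: rs) none
    by_cases h : r.sum = ((r :: rs).length : Int)
    · simp [altGo, h]
    · have hb : (r.sum == ((r :: rs).length : Int)) = false := beq_eq_false_iff_ne.mpr h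
      simp only [altGo, hb, Bool.false_eq_true, if_false]
      rw [altGo_some, foldl_zipWith_add, List.any_map, List.any_cons, hb, Bool.false_or]
      simp [Function.comp_def]

-- ===== VERDICT (by name: the statement is the Claim_ definition above) =====
theorem check_markers_spec : Claim_equal_check_markers := by
  intro arr _
  exact check_markers_eq arr
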